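-- pv_equiv track=rewrite | github.com/Carlos-SJS/TTC-Crusher | evaluator/evaluator.py | __compareWithBoardsWithNewPiece
-- ===== SOURCE A (Python) =====
-- def __compareWithBoardsWithNewPiece(pieceCode, oldBoard, newBoard):
--     for i in range(4):
--         for j in range(4):
--             if oldBoard[i][j] == 0:
--                 oldBoard[i][j] = pieceCode
--
--                 if oldBoard == newBoard:
--                     oldBoard[i][j] = 0
--                     return True
--
--                 oldBoard[i][j] = 0
--
--     return False
-- ===== SOURCE B (Python) =====
-- def __compareWithBoardsWithNewPiece(pieceCode, oldBoard, newBoard):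
--     # Collect the cells where the two boards disagree, then look for an empty
--     # cell holding pieceCode in newBoard that accounts for every difference.
--     diffs = [(i, j)
--              for i, (r, s) in enumerate(zip(oldBoard, newBoard))
--              for j, (x, y) in enumerate(zip(r, s))
--              if x != y]
--     for i in range(4):
--         for j in range(4):
--             if oldBoard[i][j] == 0 and newBoard[i][j] == pieceCode \
--                and all(d == (i, j) for d in diffs):
--                 return True
--     return False
-- ===== Notes on version B (the rewrite author's own statement) =====
-- stated objective: alternative
-- what changed: B collects the list of differing cells in one pass over both boards and then scans the 4x4 cells for an empty cell holding pieceCode in newBoard that explains every difference, instead of A's mutate-whole-board/compare/restore at each empty cell; Pre_ excludes boards of differing shapes, where A's False is decided by the shape mismatch rather than by cell contents, and boards too small for the 4x4 scan, where A raises IndexError.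
import Mathlib
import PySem

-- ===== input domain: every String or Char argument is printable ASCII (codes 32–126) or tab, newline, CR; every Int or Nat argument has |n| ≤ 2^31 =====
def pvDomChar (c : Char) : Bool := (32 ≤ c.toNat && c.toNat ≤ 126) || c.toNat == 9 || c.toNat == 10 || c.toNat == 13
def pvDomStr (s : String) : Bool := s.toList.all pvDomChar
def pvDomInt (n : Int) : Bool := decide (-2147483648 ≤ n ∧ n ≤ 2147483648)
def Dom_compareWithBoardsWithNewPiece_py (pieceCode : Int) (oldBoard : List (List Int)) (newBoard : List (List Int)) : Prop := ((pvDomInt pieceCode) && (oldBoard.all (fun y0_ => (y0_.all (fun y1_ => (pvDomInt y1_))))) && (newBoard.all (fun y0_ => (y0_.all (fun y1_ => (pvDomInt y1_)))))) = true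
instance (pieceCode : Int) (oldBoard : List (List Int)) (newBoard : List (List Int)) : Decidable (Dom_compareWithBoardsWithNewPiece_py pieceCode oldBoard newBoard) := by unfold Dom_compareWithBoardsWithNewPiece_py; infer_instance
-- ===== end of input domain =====

-- B replaces A's mutate/compare-whole-board/restore at every empty 4x4 cell by one up-front
-- pass collecting the differing cells; alternative algorithm, no speed claim.  A mutates
-- oldBoard but always restores it before returning, so the return value is the whole
-- observable behaviour.

-- ===== PORT A =====
-- oldBoard[i][j] = pieceCode; compare; restore.  Functionally: the board with cell (i,j) set.
def pvPlace (b : List (List Int)) (i j : Nat) (c : Int) : List (List Int) :=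
  b.set i ((b.getD i []).set j c)

-- inner 'for j in range(4)' loop; none-index = IndexError (excluded by Pre_)
def pvAInner (pieceCode : Int) (oldB newB : List (List Int)) (i : Nat) : List Nat → Bool
  | [] => false
  | j :: js =>
    match oldB[i]? with
    | none => false
    | some row =>
      match row[j]? with
      | none => false
      | some v =>
        if v = 0 then
          if pvPlace oldB i j pieceCode = newB then true
          else pvAInner pieceCode oldB newB i js
        else pvAInner pieceCode oldB newB i js

-- outer 'for i in range(4)' loop
def pvAOuter (pieceCode : Int) (oldB newB : List (List Int)) : List Nat → Bool
  | [] => false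
  | i :: is =>
    if pvAInner pieceCode oldB newB i (List.range 4) then true
    else pvAOuter pieceCode oldB newB is

def compareWithBoardsWithNewPiece_py (pieceCode : Int) (oldBoard : List (List Int)) (newBoard : List (List Int)) : Bool :=
  pvAOuter pieceCode oldBoard newBoard (List.range 4)

-- ===== PORT B =====
-- Source B's diffs comprehension: enumerate/zip over the full boards
def pvDiffs (oldB newB : List (List Int)) : List (Int × Int) :=
  (PySem.List.enumerate (oldB.zip newB) 0).flatMap fun irs =>
    (PySem.List.enumerate (irs.2.1.zip irs.2.2) 0).filterMap fun jxy =>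
      if jxy.2.1 ≠ jxy.2.2 then some (irs.1, jxy.1) else none

-- inner 'for j in range(4)' scan of Source B; getD-indexing agrees with Python's oldBoard[i][j] /
-- newBoard[i][j] on the domain of Pre_, where all window indices are in bounds
def pvBInner (pieceCode : Int) (oldB newB : List (List Int))
    (diffs : List (Int × Int)) (i : Nat) : List Nat → Bool
  | [] => false
  | j :: js =>
    if (oldB.getD i []).getD j 0 = 0 ∧ (newB.getD i []).getD j 0 = pieceCode ∧
        ∀ d ∈ diffs, d = ((i : Int), (j : Int)) then true
    else pvBInner pieceCode oldB newB diffs i js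

-- outer 'for i in range(4)' loop of Source B
def pvBOuter (pieceCode : Int) (oldB newB : List (List Int))
    (diffs : List (Int × Int)) : List Nat → Bool
  | [] => false
  | i :: is =>
    if pvBInner pieceCode oldB newB diffs i (List.range 4) then true
    else pvBOuter pieceCode oldB newB diffs is

def compareWithBoardsWithNewPiece_py_alt (pieceCode : Int) (oldBoard : List (List Int)) (newBoard : List (List Int)) : Bool :=
  pvBOuter pieceCode oldBoard newBoard (pvDiffs oldBoard newBoard) (List.range 4)

-- ===== PRECONDITION & SPEC =====
-- Pre_ excludes boards of differing shapes, where A's False is decided by the shape mismatch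
-- rather than by cell contents, and boards too small for the 4x4 scan, where A raises
-- IndexError: it requires same-shaped boards exposing the full 4x4 play area.
def Pre_compareWithBoardsWithNewPiece_py (pieceCode : Int) (oldBoard : List (List Int)) (newBoard : List (List Int)) : Prop :=
  4 ≤ oldBoard.length ∧ (∀ r ∈ oldBoard.take 4, 4 ≤ r.length) ∧
  oldBoard.map List.length = newBoard.map List.length

instance (pieceCode : Int) (oldBoard : List (List Int)) (newBoard : List (List Int)) : Decidable (Pre_compareWithBoardsWithNewPiece_py pieceCode oldBoard newBoard) := by unfold Pre_compareWithBoardsWithNewPiece_py; infer_instance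

def pvWitness_compareWithBoardsWithNewPiece_py : Int × List (List Int) × List (List Int) :=
  (1, [[0,0,0,0],[0,0,0,0],[0,0,0,0],[0,0,0,0]], [[1,0,0,0],[0,0,0,0],[0,0,0,0],[0,0,0,0]])

def Spec_compareWithBoardsWithNewPiece_py (pieceCode : Int) (oldBoard : List (List Int)) (newBoard : List (List Int)) (out : Bool) : Prop := out = compareWithBoardsWithNewPiece_py_alt pieceCode oldBoard newBoard
instance (pieceCode : Int) (oldBoard : List (List Int)) (newBoard : List (List Int)) (out : Bool) : Decidable (Spec_compareWithBoardsWithNewPiece_py pieceCode oldBoard newBoard out) := by unfold Spec_compareWithBoardsWithNewPiece_py; infer_instance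

-- ===== CLAIM =====
def Claim_equal_compareWithBoardsWithNewPiece_py : Prop := ∀ (pieceCode : Int) (oldBoard : List (List Int)) (newBoard : List (List Int)), Dom_compareWithBoardsWithNewPiece_py pieceCode oldBoard newBoard → Pre_compareWithBoardsWithNewPiece_py pieceCode oldBoard newBoard → Spec_compareWithBoardsWithNewPiece_py pieceCode oldBoard newBoard (compareWithBoardsWithNewPiece_py pieceCode oldBoard newBoard)

-- ===== LEMMAS AND PROOFS =====

-- getD-level facts about List.set
lemma pv_getD_set_self {α : Type} (l : List α) (i : Nat) (a d : α) (h : i < l.length) :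
    (l.set i a).getD i d = a := by
  rw [List.getD_eq_getElem _ _ (by simpa using h), List.getElem_set_self]

lemma pv_getD_set_ne {α : Type} (l : List α) (i p : Nat) (a d : α) (h : i ≠ p) :
    (l.set i a).getD p d = l.getD p d := by
  rcases lt_or_ge p l.length with hp | hp
  · rw [List.getD_eq_getElem _ _ (by simpa using hp), List.getD_eq_getElem _ _ hp,
      List.getElem_set_ne h]
  · rw [List.getD_eq_default _ _ (by simpa using hp), List.getD_eq_default _ _ hp]

lemma pv_ext_getD {α : Type} (d : α) (l1 l2 : List α) (hlen : l1.length = l2.length)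
    (h : ∀ p, p < l1.length → l1.getD p d = l2.getD p d) : l1 = l2 := by
  apply List.ext_getElem hlen
  intro p h1 h2
  have := h p h1
  rwa [List.getD_eq_getElem _ _ h1, List.getD_eq_getElem _ _ h2] at this

-- membership in the diff list, assuming equal shapes
lemma mem_pvDiffs {oldB newB : List (List Int)}
    (hmap : oldB.map List.length = newB.map List.length) (d : Int × Int) :
    d ∈ pvDiffs oldB newB ↔ ∃ p q : Nat, p < oldB.length ∧ q < (oldB.getD p []).length ∧
      d = ((p : Int), (q : Int)) ∧ (oldB.getD p []).getD q 0 ≠ (newB.getD p []).getD q 0 := by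
  have hlen : oldB.length = newB.length := by
    have := congrArg List.length hmap; simpa using this
  have hrowlen : ∀ p (hp : p < oldB.length),
      (oldB[p]'hp).length = (newB[p]'(hlen ▸ hp)).length := by
    intro p hp
    have h1 : (oldB.map List.length)[p]? = (newB.map List.length)[p]? := by rw [hmap]
    simpa [List.getElem?_map, List.getElem?_eq_getElem, hp, hlen ▸ hp] using h1
  constructor
  · rintro hd
    simp only [pvDiffs, List.mem_flatMap, List.mem_filterMap,
      PySem.List.mem_enumerate_iff] at hd
    obtain ⟨irs, ⟨k, hk, rfl⟩, jxy, ⟨m, hm, rfl⟩, hsome⟩ := hd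
    rw [List.length_zip, hlen, min_self] at hk
    have hk' : k < oldB.length := hlen ▸ hk
    simp only [List.getElem_zip] at hm hsome
    rw [List.length_zip] at hm
    have hmo : m < (oldB[k]'hk').length := lt_of_lt_of_le hm (min_le_left _ _)
    have hmn : m < (newB[k]'hk).length := lt_of_lt_of_le hm (min_le_right _ _)
    split_ifs at hsome with hne
    · injection hsome with h
      refine ⟨k, m, hk', ?_, ?_, ?_⟩
      · rw [List.getD_eq_getElem oldB [] hk']; exact hmo
      · rw [← h]; simp
      · rw [List.getD_eq_getElem oldB [] hk', List.getD_eq_getElem newB [] hk,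
          List.getD_eq_getElem _ _ hmo, List.getD_eq_getElem _ _ hmn]
        exact hne
  · rintro ⟨p, q, hp, hq, rfl, hne⟩
    have hp' : p < newB.length := hlen ▸ hp
    rw [List.getD_eq_getElem oldB [] hp] at hq hne
    rw [List.getD_eq_getElem newB [] hp'] at hne
    have hq' : q < (newB[p]'hp').length := (hrowlen p hp) ▸ hq
    rw [List.getD_eq_getElem _ _ hq, List.getD_eq_getElem _ _ hq'] at hne
    simp only [pvDiffs, List.mem_flatMap, List.mem_filterMap, PySem.List.mem_enumerate_iff]
    refine ⟨((p : Int), (oldB[p]'hp, newB[p]'hp')),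
      ⟨p, by rw [List.length_zip, hlen, min_self]; exact hp', by simp [List.getElem_zip]⟩,
      ((q : Int), ((oldB[p]'hp)[q]'hq, (newB[p]'hp')[q]'hq')),
      ⟨q, by rw [List.length_zip]; exact lt_min hq hq', by simp [List.getElem_zip]⟩, ?_⟩
    rw [if_pos hne]

-- the heart: 'board with (i,j) set to c equals newB' ↔ 'newB has c there and (i,j) explains all diffs'
lemma pvPlace_eq_iff {oldB newB : List (List Int)} {i j : Nat} {c : Int}
    (hmap : oldB.map List.length = newB.map List.length)
    (hi : i < oldB.length) (hj : j < (oldB.getD i []).length) :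
    pvPlace oldB i j c = newB ↔
      ((newB.getD i []).getD j 0 = c ∧ ∀ d ∈ pvDiffs oldB newB, d = ((i : Int), (j : Int))) := by
  have hlen : oldB.length = newB.length := by
    have := congrArg List.length hmap; simpa using this
  have hrowlen : ∀ p, p < oldB.length →
      (oldB.getD p []).length = (newB.getD p []).length := by
    intro p hp
    have hp' : p < newB.length := hlen ▸ hp
    have h1 : (oldB.map List.length)[p]? = (newB.map List.length)[p]? := by rw [hmap]
    rw [List.getD_eq_getElem oldB [] hp, List.getD_eq_getElem newB [] hp']
    simpa [List.getElem?_map, List.getElem?_eq_getElem, hp, hp'] using h1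
  constructor
  · intro he
    constructor
    · rw [← he, pvPlace, pv_getD_set_self oldB i _ [] hi, pv_getD_set_self _ j c 0 hj]
    · intro d hd
      rw [mem_pvDiffs hmap] at hd
      obtain ⟨p, q, hp, hq, rfl, hne⟩ := hd
      rw [← he, pvPlace] at hne
      by_cases hpi : p = i
      · subst hpi
        by_cases hqj : q = j
        · subst hqj; rfl
        · exfalso
          apply hne
          rw [pv_getD_set_self oldB p _ [] hp, pv_getD_set_ne _ j q c 0 (Ne.symm hqj)]
      · exfalso
        apply hne
        rw [pv_getD_set_ne oldB i p _ [] (Ne.symm hpi)]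
  · rintro ⟨hc, hall⟩
    have hcell : ∀ p q, p < oldB.length → q < (oldB.getD p []).length →
        ¬ (p = i ∧ q = j) →
        (oldB.getD p []).getD q 0 = (newB.getD p []).getD q 0 := by
      intro p q hp hq hne
      by_contra hd
      have hmem : ((p : Int), (q : Int)) ∈ pvDiffs oldB newB := by
        rw [mem_pvDiffs hmap]
        exact ⟨p, q, hp, hq, rfl, hd⟩
      have h2 := hall _ hmem
      simp only [Prod.mk.injEq, Int.natCast_inj] at h2
      exact hne h2
    apply pv_ext_getD []
    · simp [pvPlace, hlen]
    intro p hp'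
    have hp : p < oldB.length := by simpa [pvPlace] using hp'
    by_cases hpi : p = i
    · subst hpi
      rw [pvPlace, pv_getD_set_self oldB p _ [] hp]
      apply pv_ext_getD 0
      · rw [List.length_set]; exact hrowlen p hp
      intro q hq'
      have hq : q < (oldB.getD p []).length := by simpa using hq'
      by_cases hqj : q = j
      · subst hqj
        rw [pv_getD_set_self _ q c 0 hq, hc]
      · rw [pv_getD_set_ne _ j q c 0 (Ne.symm hqj)]
        exact hcell p q hp hq (by tauto)
    · rw [pvPlace, pv_getD_set_ne oldB i p _ [] (Ne.symm hpi)]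
      apply pv_ext_getD 0
      · exact hrowlen p hp
      intro q hq
      exact hcell p q hp hq (by tauto)

-- A's inner loop: with an ascending j-list, it returns True exactly at an in-bounds empty
-- cell whose placement matches (an out-of-bounds j aborts the scan, but ascending order
-- means every j before an in-bounds j is in bounds too)
lemma pvAInner_true_iff (pieceCode : Int) (oldB newB : List (List Int)) (i : Nat)
    (js : List Nat) (hmono : js.Pairwise (· ≤ ·)) :
    pvAInner pieceCode oldB newB i js = true ↔
      i < oldB.length ∧ ∃ j ∈ js, j < (oldB.getD i []).length ∧
        (oldB.getD i []).getD j 0 = 0 ∧ pvPlace oldB i j pieceCode = newB := by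
  induction js with
  | nil => simp [pvAInner]
  | cons j js ih =>
    have hmono' := (List.pairwise_cons.mp hmono).2
    have hle := (List.pairwise_cons.mp hmono).1
    rcases Nat.lt_or_ge i oldB.length with hi | hi
    · have hrow : oldB[i]? = some (oldB.getD i []) := by
        rw [List.getElem?_eq_getElem hi, List.getD_eq_getElem oldB [] hi]
      rcases Nat.lt_or_ge j (oldB.getD i []).length with hj | hj
      · have hcell : (oldB.getD i [])[j]? = some ((oldB.getD i []).getD j 0) := by
          rw [List.getElem?_eq_getElem hj, List.getD_eq_getElem _ _ hj]
        rw [pvAInner]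
        simp only [hrow, hcell]
        split_ifs with h0 hp
        · constructor
          · intro _; exact ⟨hi, j, List.mem_cons_self, hj, h0, hp⟩
          · intro _; rfl
        · rw [ih hmono']
          constructor
          · rintro ⟨_, j', hj', hrest⟩; exact ⟨hi, j', List.mem_cons_of_mem _ hj', hrest⟩
          · rintro ⟨_, j', hj', hrest⟩
            rcases List.mem_cons.mp hj' with rfl | hj'
            · exact absurd hrest.2.2 hp
            · exact ⟨hi, j', hj', hrest⟩
        · rw [ih hmono']
          constructor
          · rintro ⟨_, j', hj', hrest⟩; exact ⟨hi, j', List.mem_cons_of_mem _ hj', hrest⟩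
          · rintro ⟨_, j', hj', hrest⟩
            rcases List.mem_cons.mp hj' with rfl | hj'
            · exact absurd hrest.2.1 h0
            · exact ⟨hi, j', hj', hrest⟩
      · have hcell : (oldB.getD i [])[j]? = none := by
          rw [List.getElem?_eq_none_iff]; exact hj
        rw [pvAInner]
        simp only [hrow, hcell]
        constructor
        · intro h; cases h
        · rintro ⟨_, j', hj', hlt, _⟩
          rcases List.mem_cons.mp hj' with rfl | hj'
          · exact absurd hlt (not_lt.mpr hj)
          · exact absurd hlt (not_lt.mpr (le_trans hj (hle j' hj')))
    · have hrow : oldB[i]? = none := by rw [List.getElem?_eq_none_iff]; exact hi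
      rw [pvAInner]
      simp only [hrow]
      constructor
      · intro h; cases h
      · rintro ⟨hlt, _⟩; exact absurd hlt (not_lt.mpr hi)

lemma pvAOuter_any (pieceCode : Int) (oldB newB : List (List Int)) (is : List Nat) :
    pvAOuter pieceCode oldB newB is =
      is.any fun i => pvAInner pieceCode oldB newB i (List.range 4) := by
  induction is with
  | nil => simp [pvAOuter]
  | cons i is ih =>
    rw [pvAOuter, ih]
    by_cases h : pvAInner pieceCode oldB newB i (List.range 4) = true <;> simp [h]

-- B's inner loop: True exactly at a j in the scan list satisfying Source B's condition
lemma pvBInner_true_iff (pieceCode : Int) (oldB newB : List (List Int))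
    (diffs : List (Int × Int)) (i : Nat) (js : List Nat) :
    pvBInner pieceCode oldB newB diffs i js = true ↔
      ∃ j ∈ js, (oldB.getD i []).getD j 0 = 0 ∧ (newB.getD i []).getD j 0 = pieceCode ∧
        ∀ d ∈ diffs, d = ((i : Int), (j : Int)) := by
  induction js with
  | nil => simp [pvBInner]
  | cons j js ih =>
    rw [pvBInner]
    split_ifs with hc
    · constructor
      · intro _; exact ⟨j, List.mem_cons_self, hc⟩
      · intro _; rfl
    · refine Iff.trans ih ?_
      constructor
      · rintro ⟨j', hj', hrest⟩; exact ⟨j', List.mem_cons_of_mem _ hj', hrest⟩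
      · rintro ⟨j', hj', hrest⟩
        rcases List.mem_cons.mp hj' with rfl | hj'
        · exact absurd hrest hc
        · exact ⟨j', hj', hrest⟩

lemma pvBOuter_any (pieceCode : Int) (oldB newB : List (List Int))
    (diffs : List (Int × Int)) (is : List Nat) :
    pvBOuter pieceCode oldB newB diffs is =
      is.any fun i => pvBInner pieceCode oldB newB diffs i (List.range 4) := by
  induction is with
  | nil => simp [pvBOuter]
  | cons i is ih =>
    rw [pvBOuter, ih]
    by_cases h : pvBInner pieceCode oldB newB diffs i (List.range 4) = true <;> simp [h]

-- ===== VERDICT =====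
theorem compareWithBoardsWithNewPiece_py_spec : Claim_equal_compareWithBoardsWithNewPiece_py := by
  intro pieceCode oldB newB _ hpre
  obtain ⟨h4, hrows, hmap⟩ := hpre
  have hmono : (List.range 4).Pairwise (· ≤ ·) :=
    (List.pairwise_lt_range).imp le_of_lt
  have hrowlen : ∀ i, i < 4 → 4 ≤ (oldB.getD i []).length := by
    intro i hi
    have hio : i < oldB.length := lt_of_lt_of_le hi h4
    rw [List.getD_eq_getElem oldB [] hio]
    refine hrows _ ?_
    rw [List.mem_take_iff_getElem]
    exact ⟨i, by omega, by simp⟩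
  unfold Spec_compareWithBoardsWithNewPiece_py
  rw [Bool.eq_iff_iff, compareWithBoardsWithNewPiece_py, pvAOuter_any,
    compareWithBoardsWithNewPiece_py_alt, pvBOuter_any]
  simp only [List.any_eq_true, List.mem_range]
  constructor
  · rintro ⟨i, hi, hinner⟩
    obtain ⟨hio, j, hj, hjlen, h0, hplace⟩ :=
      (pvAInner_true_iff pieceCode oldB newB i _ hmono).mp hinner
    have hkey := (pvPlace_eq_iff hmap hio hjlen).mp hplace
    exact ⟨i, hi, (pvBInner_true_iff pieceCode oldB newB _ i _).mpr
      ⟨j, hj, h0, hkey.1, hkey.2⟩⟩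
  · rintro ⟨i, hi, hinner⟩
    obtain ⟨j, hj, h0, hc, hall⟩ :=
      (pvBInner_true_iff pieceCode oldB newB _ i _).mp hinner
    have hio : i < oldB.length := lt_of_lt_of_le hi h4
    have hjlen : j < (oldB.getD i []).length :=
      lt_of_lt_of_le (List.mem_range.mp hj) (hrowlen i hi)
    have hplace := (pvPlace_eq_iff hmap hio hjlen).mpr ⟨hc, hall⟩
    exact ⟨i, hi, (pvAInner_true_iff pieceCode oldB newB i _ hmono).mpr
      ⟨hio, j, hj, hjlen, h0, hplace⟩⟩
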